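-- pv_equiv track=rewrite | github.com/tdenton8772/foobar | solution_3_1.py | multiply_matrix
-- ===== SOURCE A (Python) =====
-- def transpose(matrix):
--     height = len(matrix)
--     if len(matrix) == 0:
--         return(matrix)
--     width = len(matrix[0])
--     new_matrix = []
--     for y in range(0, width):
--         new_row = []
--         for x in range(0,height):
--             new_row.append(matrix[x][y])
--         new_matrix.append(new_row)
--     return new_matrix
--
-- def multiply_matrix(matr_a, matr_b):
--     inv_b = transpose(matr_b)
--
--     final_array = []
--
--     for y in inv_b:
--         temp_row = []
--         for x in matr_a:
--             total = 0
--             for index, x_x in enumerate(x):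
--                 total += y[index]*x_x
--             temp_row.append(total)
--         final_array.append(temp_row)
--     final_array = transpose(final_array)
--     return(final_array[0])
-- ===== SOURCE B (Python) =====
-- def multiply_matrix(matr_a, matr_b):
--     result = [0] * len(matr_b[0])
--     for k in range(len(matr_a[0])):
--         coeff = matr_a[0][k]
--         row = matr_b[k]
--         result = [result[j] + coeff * row[j] for j in range(len(result))]
--     return result
-- ===== Notes on version B (the rewrite author's own statement) =====
-- stated objective: faster
-- what changed: B computes only the requested first row directly as matr_a[0] times the rows of matr_b (one pass over the contraction index, no transpose helper), instead of A's transpose + full matrix product + second transpose.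
import Mathlib
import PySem

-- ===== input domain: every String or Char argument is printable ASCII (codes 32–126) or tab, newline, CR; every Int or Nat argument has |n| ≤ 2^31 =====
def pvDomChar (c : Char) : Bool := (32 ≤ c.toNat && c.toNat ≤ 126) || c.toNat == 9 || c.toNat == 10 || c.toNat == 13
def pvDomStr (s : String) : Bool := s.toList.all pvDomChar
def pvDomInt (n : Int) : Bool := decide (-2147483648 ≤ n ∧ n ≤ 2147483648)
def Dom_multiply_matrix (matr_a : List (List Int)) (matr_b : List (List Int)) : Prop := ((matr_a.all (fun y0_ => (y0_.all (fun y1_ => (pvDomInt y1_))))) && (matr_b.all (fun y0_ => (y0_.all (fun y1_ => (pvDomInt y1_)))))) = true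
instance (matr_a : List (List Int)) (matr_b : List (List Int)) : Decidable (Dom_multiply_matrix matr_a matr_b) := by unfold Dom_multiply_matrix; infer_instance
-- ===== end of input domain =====

-- B computes only the requested first product row as row-of-A times rows-of-B (no transpose,
-- no other product rows); equivalence is about the return value on inputs where A returns.

-- ===== PORT A =====
-- helper: literal port of A's `transpose` (indices produced by `range` are in range
-- whenever the Python does not raise, so `List.getD` is exact there)
def pvTranspose (m : List (List Int)) : List (List Int) :=
  if m.length = 0 then m
  else (List.range (m.getD 0 []).length).map (fun y =>
         (List.range m.length).map (fun x => (m.getD x []).getD y 0))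

def multiply_matrix (matr_a : List (List Int)) (matr_b : List (List Int)) : List Int :=
  let inv_b := pvTranspose matr_b
  let final_array := inv_b.map (fun y =>
    matr_a.map (fun x =>
      (PySem.List.enumerate x 0).foldl
        (fun total p => total + PySem.List.pyGetD y p.1 0 * p.2) 0))
  (pvTranspose final_array).getD 0 []

-- ===== PORT B =====
def multiply_matrix_alt (matr_a : List (List Int)) (matr_b : List (List Int)) : List Int :=
  (List.range (matr_a.getD 0 []).length).foldl
    (fun result k =>
      let coeff := (matr_a.getD 0 []).getD k 0
      let row := matr_b.getD k []
      (List.range result.length).map (fun j => result.getD j 0 + coeff * row.getD j 0))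
    (List.replicate (matr_b.getD 0 []).length 0)

-- ===== PRECONDITION & SPEC =====
-- Pre_ is exactly the set of inputs on which the Python A returns normally (outside it A
-- raises an IndexError: empty operands, a row of matr_b shorter than matr_b[0], or a row
-- of matr_a longer than the height of matr_b).
def Pre_multiply_matrix (matr_a : List (List Int)) (matr_b : List (List Int)) : Prop :=
  matr_a ≠ [] ∧ matr_b ≠ [] ∧ (matr_b.getD 0 []) ≠ [] ∧
  (∀ r ∈ matr_b, (matr_b.getD 0 []).length ≤ r.length) ∧
  (∀ r ∈ matr_a, r.length ≤ matr_b.length)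

instance (matr_a : List (List Int)) (matr_b : List (List Int)) : Decidable (Pre_multiply_matrix matr_a matr_b) := by unfold Pre_multiply_matrix; infer_instance

def pvWitness_multiply_matrix : List (List Int) × List (List Int) :=
  ([[1, 2], [3, 4]], [[5, 6], [7, 8]])

def Spec_multiply_matrix (matr_a : List (List Int)) (matr_b : List (List Int)) (out : List Int) : Prop := out = multiply_matrix_alt matr_a matr_b
instance (matr_a : List (List Int)) (matr_b : List (List Int)) (out : List Int) : Decidable (Spec_multiply_matrix matr_a matr_b out) := by unfold Spec_multiply_matrix; infer_instance

-- ===== CLAIM (what is proved, stated in full; the proofs are below) =====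
def Claim_equal_multiply_matrix : Prop := ∀ (matr_a : List (List Int)) (matr_b : List (List Int)), Dom_multiply_matrix matr_a matr_b → Pre_multiply_matrix matr_a matr_b → Spec_multiply_matrix matr_a matr_b (multiply_matrix matr_a matr_b)

-- ===== LEMMAS AND PROOFS =====

-- the common closed form: entry j of the first product row, summed over k
def pvRow (matr_a matr_b : List (List Int)) : List Int :=
  (List.range ((matr_b.getD 0 []).length)).map (fun j =>
    ((List.range ((matr_a.getD 0 []).length)).map
      (fun k => (matr_a.getD 0 []).getD k 0 * (matr_b.getD k []).getD j 0)).sum)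

theorem getD_map_range' {α : Type} (f : Nat → α) {n j : Nat} (d : α) (h : j < n) :
    ((List.range n).map f).getD j d = f j := by
  simp [List.getD, h]

theorem alt_inv (matr_a matr_b : List (List Int)) (n : Nat) :
    (List.range n).foldl
      (fun result k =>
        let coeff := (matr_a.getD 0 []).getD k 0
        let row := matr_b.getD k []
        (List.range result.length).map (fun j => result.getD j 0 + coeff * row.getD j 0))
      (List.replicate (matr_b.getD 0 []).length 0)
    = (List.range ((matr_b.getD 0 []).length)).map (fun j =>
        ((List.range n).map
          (fun k => (matr_a.getD 0 []).getD k 0 * (matr_b.getD k []).getD j 0)).sum) := by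
  induction n with
  | zero => simp
  | succ n ih =>
    rw [List.range_succ, List.foldl_append, ih]
    simp only [List.foldl_cons, List.foldl_nil, List.length_map, List.length_range]
    apply List.map_congr_left
    intro j hj
    rw [List.mem_range] at hj
    rw [getD_map_range' _ 0 hj, List.map_append, List.sum_append]
    simp

theorem alt_eq (matr_a matr_b : List (List Int)) :
    multiply_matrix_alt matr_a matr_b = pvRow matr_a matr_b := by
  unfold multiply_matrix_alt pvRow
  exact alt_inv matr_a matr_b _

theorem dot_aux (y : List Int) :
    ∀ (x : List Int) (s : Nat) (t : Int),
    (PySem.List.enumerate x (s : Int)).foldl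
      (fun total p => total + PySem.List.pyGetD y p.1 0 * p.2) t
    = t + ((List.range x.length).map (fun k => y.getD (s + k) 0 * x.getD k 0)).sum := by
  intro x
  induction x with
  | nil => intro s t; simp [PySem.List.enumerate_nil]
  | cons v xs ih =>
    intro s t
    rw [PySem.List.enumerate_cons]
    have hcast : (s : Int) + 1 = ((s + 1 : Nat) : Int) := by push_cast; ring
    simp only [List.foldl_cons, hcast]
    rw [ih (s + 1) (t + PySem.List.pyGetD y (s : Int) 0 * v)]
    rw [List.length_cons, List.range_succ_eq_map]
    simp only [List.map_cons, List.map_map, List.sum_cons]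
    rw [PySem.List.pyGetD_natCast]
    have : ((List.range xs.length).map (fun k => y.getD (s + 1 + k) 0 * xs.getD k 0))
         = ((List.range xs.length).map ((fun k => y.getD (s + k) 0 * (v :: xs).getD k 0) ∘ Nat.succ)) := by
      apply List.map_congr_left
      intro k _
      simp only [Function.comp]
      have : s + 1 + k = s + Nat.succ k := by omega
      rw [this]
      rfl
    rw [this]
    simp
    ring

theorem a_eq (matr_a matr_b : List (List Int))
    (hpre : Pre_multiply_matrix matr_a matr_b) :
    multiply_matrix matr_a matr_b = pvRow matr_a matr_b := by
  obtain ⟨ha, hb, hb0, hbrows, harows⟩ := hpre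
  have hbl : matr_b.length ≠ 0 := by simpa [List.length_eq_zero_iff] using hb
  have hal : matr_a.length ≠ 0 := by simpa [List.length_eq_zero_iff] using ha
  have hw : 0 < (matr_b.getD 0 []).length := List.length_pos_iff.mpr hb0
  set w := (matr_b.getD 0 []).length with hwdef
  set H := matr_b.length with hHdef
  set a0 := matr_a.getD 0 [] with ha0def
  have ha0mem : a0 ∈ matr_a := by
    have h0 : 0 < matr_a.length := by omega
    have : matr_a[0]? = some a0 := by
      rw [List.getElem?_eq_getElem h0]
      simp [ha0def, List.getD, List.getElem?_eq_getElem h0]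
    exact List.mem_of_getElem? this
  have ha0len : a0.length ≤ H := harows a0 ha0mem
  unfold multiply_matrix
  rw [show pvTranspose matr_b
      = (List.range w).map (fun y => (List.range H).map (fun x => (matr_b.getD x []).getD y 0))
    from by unfold pvTranspose; rw [if_neg hbl]]
  set col : Nat → List Int := fun j => (List.range H).map (fun x => (matr_b.getD x []).getD j 0)
    with hcol
  set dot : List Int → List Int → Int := fun y x =>
    (PySem.List.enumerate x 0).foldl (fun total p => total + PySem.List.pyGetD y p.1 0 * p.2) 0
    with hdot
  set G : List Int → List Int := fun y => matr_a.map (fun x => dot y x) with hG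
  simp only [List.map_map]
  set final := (List.range w).map (G ∘ col) with hfinal
  have hfl : final.length = w := by simp [hfinal]
  have hflne : final.length ≠ 0 := by omega
  have hf0 : final.getD 0 [] = G (col 0) := by
    rw [hfinal, getD_map_range' (G ∘ col) [] hw]; rfl
  have hf0len : (final.getD 0 []).length = matr_a.length := by
    rw [hf0, hG]; simp
  rw [show pvTranspose final
      = (List.range (final.getD 0 []).length).map (fun y =>
          (List.range final.length).map (fun x => (final.getD x []).getD y 0))
    from by unfold pvTranspose; rw [if_neg hflne]]
  rw [getD_map_range' _ [] (by rw [hf0len]; omega)]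
  rw [hfl]
  unfold pvRow
  apply List.map_congr_left
  intro j hj
  rw [List.mem_range] at hj
  rw [show final.getD j [] = G (col j) from by
        rw [hfinal, getD_map_range' (G ∘ col) [] hj]; rfl]
  have hGj : (G (col j)).getD 0 0 = dot (col j) a0 := by
    have h0 : 0 < matr_a.length := by omega
    rw [hG]
    simp [List.getD, ha0def, List.getElem?_eq_getElem h0]
  have hd := dot_aux (col j) a0 0 0
  simp only [Nat.cast_zero, zero_add] at hd
  have hd' : dot (col j) a0
      = ((List.range a0.length).map (fun k => (col j).getD k 0 * a0.getD k 0)).sum := hd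
  rw [hGj, hd']
  apply congrArg List.sum
  apply List.map_congr_left
  intro k hk
  rw [List.mem_range] at hk
  rw [hcol]
  rw [getD_map_range' _ 0 (by omega)]
  ring

-- ===== VERDICT (by name: the statement is the Claim_ definition above) =====
theorem multiply_matrix_spec : Claim_equal_multiply_matrix := by
  intro matr_a matr_b _ hpre
  unfold Spec_multiply_matrix
  rw [alt_eq, a_eq matr_a matr_b hpre]
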